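-- pv_equiv track=rewrite | github.com/UmutSanci01/Veri-Yapilari | Medium Problems/RecurringSequenceOfFraction.py | find_recurring
-- ===== SOURCE A (Python) =====
-- def find_recurring(a, b):
--     if b == 0: return "Zero Division Error"
--     if a == 0: return 0
--
--     remainders = {}
--     res = [a//b, '.']
--     rem = a % b
--     while rem != 0:
--         if rem in remainders:
--             start_index = remainders[rem]
--             return ''.join(res[start_index : ])
--         remainders[rem] = len(res)
--         rem *= 10
--         res.append(str(rem//b))
--         rem = rem % b
--     return "No Recurring Secuence"
-- ===== SOURCE B (Python) =====
-- def find_recurring(a, b):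
--     if b == 0: return "Zero Division Error"
--     if a == 0: return 0
--
--     # Phase 1: walk r -> r*10 % b remembering only the set of remainders seen,
--     # until the remainder is 0 (terminating decimal) or repeats (cycle found).
--     seen = set()
--     rem = a % b
--     while rem != 0 and rem not in seen:
--         seen.add(rem)
--         rem = rem * 10 % b
--
--     if rem == 0:
--         return "No Recurring Secuence"
--
--     # Phase 2: rem is the first remainder that repeats, i.e. the cycle-start
--     # remainder; regenerate exactly one full cycle of digits from it.
--     rs = rem
--     digits = []
--     r = rs
--     while True:
--         digits.append(str(r * 10 // b))
--         r = r * 10 % b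
--         if r == rs:
--             break
--     return ''.join(digits)
-- ===== Notes on version B (the rewrite author's own statement) =====
-- stated objective: alternative
-- what changed: A records every remainder's position in a dict alongside the growing digit list and returns a slice of that list; B only remembers the set of remainders until one repeats, then regenerates exactly one full cycle of digits from that cycle-start remainder, so no positions or pre-period digits are ever stored.
-- outside the precondition, e.g. on find_recurring(0, 3): A returns 0, B returns 0
import Mathlib
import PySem

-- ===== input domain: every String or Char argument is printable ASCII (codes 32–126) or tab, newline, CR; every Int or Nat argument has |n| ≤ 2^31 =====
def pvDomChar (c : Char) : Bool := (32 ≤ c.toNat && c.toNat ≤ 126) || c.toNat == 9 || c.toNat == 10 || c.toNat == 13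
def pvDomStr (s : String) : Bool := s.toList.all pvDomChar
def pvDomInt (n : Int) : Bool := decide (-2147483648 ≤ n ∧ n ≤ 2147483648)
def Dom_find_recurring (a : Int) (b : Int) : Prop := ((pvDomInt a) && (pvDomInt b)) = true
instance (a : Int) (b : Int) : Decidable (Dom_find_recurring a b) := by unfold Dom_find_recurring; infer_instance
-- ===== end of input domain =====

-- B keeps only the SET of remainders and regenerates one full digit cycle from the first
-- repeating remainder, instead of A's dict of positions plus slice of the digit list.
-- On a == 0 the Python programs return the int 0, not a string; that input is outside Pre_.

-- ===== PORT A =====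
-- the while loop of A; fuel |b|+1 is a totality guard only (the loop repeats a
-- remainder or hits 0 within |b| steps, so the 0-fuel branch is never reached)
def findRecLoopA (b : Int) : Nat → PySem.Dict Int Int → List String → Int → String
  | 0, _, _, _ => ""
  | fuel+1, remainders, res, rem =>
    if rem ≠ 0 then
      match remainders.get? rem with
      | some start_index => PySem.Str.join "" (PySem.List.slice res (some start_index) none)
      | none =>
        let remainders' := remainders.insert rem (res.length : Int)
        let rem' := rem * 10
        let res' := res ++ [PySem.Int.toStr (PySem.Int.floordiv rem' b)]
        findRecLoopA b fuel remainders' res' (PySem.Int.mod rem' b)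
    else "No Recurring Secuence"

def find_recurring (a : Int) (b : Int) : String :=
  if b = 0 then "Zero Division Error"
  else if a = 0 then "0"  -- Python returns the int 0 here; outside Pre_
  else
    -- res = [a//b, '.']: only the string elements res[2:] are ever joined
    findRecLoopA b (b.natAbs + 1) PySem.Dict.empty
      [PySem.Int.toStr (PySem.Int.floordiv a b), "."] (PySem.Int.mod a b)

-- ===== PORT B =====
-- phase 1: advance rem while it is nonzero and unseen; fuel is a totality guard
def findRecSeek (b : Int) : Nat → PySem.Set Int → Int → Int
  | 0, _, rem => rem
  | fuel+1, seen, rem =>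
    if rem ≠ 0 ∧ PySem.Set.contains seen rem = false then
      findRecSeek b fuel (PySem.Set.add seen rem) (PySem.Int.mod (rem * 10) b)
    else rem

-- phase 2: emit digits from the cycle-start remainder until it recurs
def findRecEmit (b rs : Int) : Nat → Int → List String → List String
  | 0, _, digits => digits
  | fuel+1, r, digits =>
    let digits' := digits ++ [PySem.Int.toStr (PySem.Int.floordiv (r * 10) b)]
    let r' := PySem.Int.mod (r * 10) b
    if r' = rs then digits' else findRecEmit b rs fuel r' digits'

def find_recurring_alt (a : Int) (b : Int) : String :=
  if b = 0 then "Zero Division Error"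
  else if a = 0 then "0"  -- Python returns the int 0 here; outside Pre_
  else
    let rem := findRecSeek b (b.natAbs + 1) PySem.Set.empty (PySem.Int.mod a b)
    if rem = 0 then "No Recurring Secuence"
    else PySem.Str.join "" (findRecEmit b rem (b.natAbs + 1) rem [])

-- ===== PRECONDITION & SPEC =====
-- Pre_ excludes exactly a = 0, where the Python programs return the int 0 (not a string),
-- a value outside the declared String return type.
def Pre_find_recurring (a : Int) (_b : Int) : Prop := a ≠ 0
instance (a : Int) (b : Int) : Decidable (Pre_find_recurring a b) := by
  unfold Pre_find_recurring; infer_instance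

def pvWitness_find_recurring : Int × Int := (1, 7)

def Spec_find_recurring (a : Int) (b : Int) (out : String) : Prop := out = find_recurring_alt a b
instance (a : Int) (b : Int) (out : String) : Decidable (Spec_find_recurring a b out) := by
  unfold Spec_find_recurring; infer_instance

-- ===== CLAIM (what is proved, stated in full; the proofs are below) =====
def Claim_equal_find_recurring : Prop := ∀ (a : Int) (b : Int), Dom_find_recurring a b →
  Pre_find_recurring a b → Spec_find_recurring a b (find_recurring a b)

-- ===== LEMMAS AND PROOFS =====

-- the remainder sequence r_0 = a % b, r_{k+1} = (r_k * 10) % b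
def pvItr (a b : Int) : Nat → Int
  | 0 => PySem.Int.mod a b
  | k+1 => PySem.Int.mod (pvItr a b k * 10) b

-- digit emitted while leaving remainder r_j
def pvDig (a b : Int) (j : Nat) : String :=
  PySem.Int.toStr (PySem.Int.floordiv (pvItr a b j * 10) b)

-- every r_k lies strictly inside the divisor's residue interval
theorem pvItr_bounds (a b : Int) (_hb : b ≠ 0) (k : Nat) :
    (0 < b → 0 ≤ pvItr a b k ∧ pvItr a b k < b) ∧
    (b < 0 → b < pvItr a b k ∧ pvItr a b k ≤ 0) := by
  cases k with
  | zero =>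
    exact ⟨fun h => ⟨PySem.Int.mod_nonneg a h, PySem.Int.mod_lt a h⟩,
           fun h => PySem.Int.mod_neg_bounds a h⟩
  | succ k =>
    exact ⟨fun h => ⟨PySem.Int.mod_nonneg _ h, PySem.Int.mod_lt _ h⟩,
           fun h => PySem.Int.mod_neg_bounds _ h⟩

theorem pvItr_natAbs_lt (a b : Int) (hb : b ≠ 0) (k : Nat) :
    (pvItr a b k).natAbs < b.natAbs := by
  have h := pvItr_bounds a b hb k
  rcases lt_or_gt_of_ne hb with hneg | hpos
  · have := h.2 hneg; omega
  · have := h.1 hpos; omega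

theorem pvItr_natAbs_inj (a b : Int) (hb : b ≠ 0) {j k : Nat}
    (h : (pvItr a b j).natAbs = (pvItr a b k).natAbs) : pvItr a b j = pvItr a b k := by
  have hj := pvItr_bounds a b hb j
  have hk := pvItr_bounds a b hb k
  rcases lt_or_gt_of_ne hb with hneg | hpos
  · have h1 := hj.2 hneg; have h2 := hk.2 hneg; omega
  · have h1 := hj.1 hpos; have h2 := hk.1 hpos; omega

-- "the walk stops at n": remainder 0 or a repeat of an earlier remainder
def pvStop (a b : Int) (n : Nat) : Prop :=
  pvItr a b n = 0 ∨ ∃ j < n, pvItr a b j = pvItr a b n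

-- decidability of pvStop, passed to Nat.find explicitly (not an instance declaration)
@[reducible] def pvStopDec (a b : Int) : DecidablePred (pvStop a b) := fun n => by
  unfold pvStop; infer_instance

theorem pvStop_exists (a b : Int) (hb : b ≠ 0) : ∃ n, n ≤ b.natAbs ∧ pvStop a b n := by
  have hmaps : ∀ k ∈ Finset.range (b.natAbs + 1),
      (pvItr a b k).natAbs ∈ Finset.range b.natAbs := by
    intro k _; exact Finset.mem_range.2 (pvItr_natAbs_lt a b hb k)
  have hcard : (Finset.range b.natAbs).card < (Finset.range (b.natAbs + 1)).card := by
    simp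
  obtain ⟨x, hx, y, hy, hxy, hfeq⟩ :=
    Finset.exists_ne_map_eq_of_card_lt_of_maps_to hcard hmaps
  have heq := pvItr_natAbs_inj a b hb hfeq
  rcases Nat.lt_or_ge x y with hlt | hge
  · exact ⟨y, Nat.lt_succ_iff.1 (Finset.mem_range.1 hy),
      Or.inr ⟨x, hlt, heq⟩⟩
  · have hlt : y < x := lt_of_le_of_ne hge (fun h => hxy h.symm)
    exact ⟨x, Nat.lt_succ_iff.1 (Finset.mem_range.1 hx),
      Or.inr ⟨y, hlt, heq.symm⟩⟩

-- N: first index where the walk stops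
def pvN (a b : Int) (hb : b ≠ 0) : Nat :=
  @Nat.find (pvStop a b) (pvStopDec a b)
    (⟨(pvStop_exists a b hb).choose, (pvStop_exists a b hb).choose_spec.2⟩ :
    ∃ n, pvStop a b n)

theorem pvN_le (a b : Int) (hb : b ≠ 0) : pvN a b hb ≤ b.natAbs :=
  le_trans (@Nat.find_le _ _ (pvStopDec a b) _ (pvStop_exists a b hb).choose_spec.2)
    (pvStop_exists a b hb).choose_spec.1

theorem pvN_spec (a b : Int) (hb : b ≠ 0) : pvStop a b (pvN a b hb) :=
  @Nat.find_spec (pvStop a b) (pvStopDec a b) _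

theorem pvN_min (a b : Int) (hb : b ≠ 0) {i : Nat} (h : i < pvN a b hb) :
    ¬ pvStop a b i := @Nat.find_min (pvStop a b) (pvStopDec a b) _ _ h

-- strictly before N: remainders nonzero and pairwise distinct
theorem pvItr_ne_zero (a b : Int) (hb : b ≠ 0) {i : Nat} (h : i < pvN a b hb) :
    pvItr a b i ≠ 0 := fun h0 => pvN_min a b hb h (Or.inl h0)

theorem pvItr_inj (a b : Int) (hb : b ≠ 0) {j i : Nat} (hji : j < i) (hi : i < pvN a b hb) :
    pvItr a b j ≠ pvItr a b i :=
  fun h => pvN_min a b hb hi (Or.inr ⟨j, hji, h⟩)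

-- μ: first index whose remainder equals r_N
def pvMu (a b : Int) (hb : b ≠ 0) : Nat :=
  Nat.find (⟨pvN a b hb, rfl⟩ : ∃ j, pvItr a b j = pvItr a b (pvN a b hb))

theorem pvMu_spec (a b : Int) (hb : b ≠ 0) :
    pvItr a b (pvMu a b hb) = pvItr a b (pvN a b hb) := by
  unfold pvMu
  exact Nat.find_spec (⟨pvN a b hb, rfl⟩ : ∃ j, pvItr a b j = pvItr a b (pvN a b hb))

theorem pvMu_lt (a b : Int) (hb : b ≠ 0) (hnz : pvItr a b (pvN a b hb) ≠ 0) :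
    pvMu a b hb < pvN a b hb := by
  rcases pvN_spec a b hb with h0 | ⟨j, hj, hje⟩
  · exact absurd h0 hnz
  · exact lt_of_le_of_lt (Nat.find_min' _ hje) hj

-- only μ (below N) maps to r_N
theorem pvMu_unique (a b : Int) (hb : b ≠ 0) {k : Nat}
    (hk : k < pvN a b hb) (he : pvItr a b k = pvItr a b (pvN a b hb)) :
    k = pvMu a b hb := by
  have hle : pvMu a b hb ≤ k := Nat.find_min' _ he
  rcases eq_or_lt_of_le hle with h | h
  · exact h.symm
  · exact absurd ((pvMu_spec a b hb).trans he.symm)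
      (pvItr_inj a b hb h hk)


-- dict contents and digit list after i iterations of A's loop
def pvDmap (a b : Int) (i : Nat) : List (Int × Int) :=
  (List.range i).map (fun j => (pvItr a b j, ((j : Int) + 2)))

def pvRes (a b : Int) (i : Nat) : List String :=
  [PySem.Int.toStr (PySem.Int.floordiv a b), "."] ++ (List.range i).map (pvDig a b)

theorem pvDmap_keys (a b : Int) (i : Nat) :
    (PySem.Dict.mk (pvDmap a b i)).keys = (List.range i).map (pvItr a b) := by
  simp [pvDmap, PySem.Dict.keys, Function.comp]

theorem pvDmap_keys_nodup (a b : Int) (hb : b ≠ 0) {i : Nat} (hi : i ≤ pvN a b hb) :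
    ((List.range i).map (pvItr a b)).Nodup := by
  rw [List.nodup_map_iff_inj_on List.nodup_range]
  intro x hx y hy hxy
  rcases Nat.lt_trichotomy x y with h | h | h
  · exact absurd hxy (pvItr_inj a b hb h (lt_of_lt_of_le (List.mem_range.1 hy) hi))
  · exact h
  · exact absurd hxy.symm (pvItr_inj a b hb h (lt_of_lt_of_le (List.mem_range.1 hx) hi))

-- A's loop, characterised: it returns "No Recurring Secuence" iff the walk hits 0,
-- else the digits from index mu up to N-1, joined
theorem findRecLoopA_spec (a b : Int) (hb : b ≠ 0) :
    ∀ (fuel i : Nat), i ≤ pvN a b hb → pvN a b hb - i < fuel →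
    findRecLoopA b fuel (PySem.Dict.mk (pvDmap a b i)) (pvRes a b i) (pvItr a b i) =
      if pvItr a b (pvN a b hb) = 0 then "No Recurring Secuence"
      else PySem.Str.join ""
        (((List.range (pvN a b hb)).map (pvDig a b)).drop (pvMu a b hb + 2 - 2)) := by
  intro fuel
  induction fuel with
  | zero => intro i _ h; omega
  | succ fuel ih =>
    intro i hi hfuel
    rcases eq_or_lt_of_le hi with hiN | hiN
    · -- i = N: the loop stops here
      subst hiN
      by_cases h0 : pvItr a b (pvN a b hb) = 0
      · simp [findRecLoopA, h0]
      · -- repeat case: the dict lookup hits, at the unique index mu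
        have hmu_lt : pvMu a b hb < pvN a b hb := pvMu_lt a b hb h0
        have hmem : (pvItr a b (pvN a b hb), ((pvMu a b hb : Int) + 2)) ∈
            pvDmap a b (pvN a b hb) := by
          have h1 : (pvItr a b (pvMu a b hb), ((pvMu a b hb : Int) + 2)) ∈
              pvDmap a b (pvN a b hb) := by
            simp only [pvDmap, List.mem_map]
            exact ⟨pvMu a b hb, List.mem_range.2 hmu_lt, rfl⟩
          rwa [pvMu_spec a b hb] at h1
        have hget : (PySem.Dict.mk (pvDmap a b (pvN a b hb))).get? (pvItr a b (pvN a b hb)) =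
            some ((pvMu a b hb : Int) + 2) :=
          PySem.Dict.get?_of_mem_items _ hmem
            (by rw [pvDmap_keys]; exact pvDmap_keys_nodup a b hb le_rfl)
        have hne : pvItr a b (pvN a b hb) ≠ 0 := h0
        show (if pvItr a b (pvN a b hb) ≠ 0 then _ else _) = _
        rw [if_pos hne, hget]
        show PySem.Str.join "" (PySem.List.slice (pvRes a b (pvN a b hb))
          (some ((pvMu a b hb : Int) + 2)) none) = _
        rw [if_neg h0]
        have htoNat : (((pvMu a b hb : Int)) + 2).toNat = pvMu a b hb + 2 := by omega
        have hslice : PySem.List.slice (pvRes a b (pvN a b hb))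
            (some ((pvMu a b hb : Int) + 2)) none =
            ((List.range (pvN a b hb)).map (pvDig a b)).drop (pvMu a b hb) := by
          rw [PySem.List.slice_from _ (by positivity), htoNat]
          show List.drop (pvMu a b hb + 1 + 1) (_ :: _ :: _) = _
          rw [List.drop_succ_cons, List.drop_succ_cons]
          simp
        rw [hslice]
        have h22 : pvMu a b hb + 2 - 2 = pvMu a b hb := by omega
        rw [h22]
    · -- i < N: one more iteration
      have hnz : pvItr a b i ≠ 0 := pvItr_ne_zero a b hb hiN
      have hnotmem : pvItr a b i ∉ (PySem.Dict.mk (pvDmap a b i)).keys := by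
        rw [pvDmap_keys]
        intro hmem
        obtain ⟨j, hj, hje⟩ := List.mem_map.1 hmem
        exact pvItr_inj a b hb (List.mem_range.1 hj) hiN hje
      have hget : (PySem.Dict.mk (pvDmap a b i)).get? (pvItr a b i) = none :=
        ((PySem.Dict.mk (pvDmap a b i)).get?_eq_none_iff_not_mem_keys _).2 hnotmem
      have hcont : (PySem.Dict.mk (pvDmap a b i)).contains (pvItr a b i) = false := by
        rw [← Bool.not_eq_true, PySem.Dict.contains_iff_mem_keys]; exact hnotmem
      rw [findRecLoopA, if_pos hnz, hget]
      have hins : (PySem.Dict.mk (pvDmap a b i)).insert (pvItr a b i)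
          ((pvRes a b i).length : Int) = PySem.Dict.mk (pvDmap a b (i + 1)) := by
        apply PySem.Dict.ext
        rw [PySem.Dict.items_insert_of_not_contains _ _ hcont]
        show pvDmap a b i ++ _ = pvDmap a b (i + 1)
        simp only [pvDmap, List.range_succ, List.map_append, List.map_cons, List.map_nil]
        congr 2
        simp [pvRes]
        omega
      have hres : pvRes a b i ++ [PySem.Int.toStr (PySem.Int.floordiv (pvItr a b i * 10) b)] =
          pvRes a b (i + 1) := by
        simp [pvRes, List.range_succ, pvDig]
      show findRecLoopA b fuel _ _ _ = _
      rw [hins, hres]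
      exact ih (i + 1) hiN (by omega)

-- B's first loop returns r_N whatever N's stop reason is
theorem findRecSeek_spec (a b : Int) (hb : b ≠ 0) :
    ∀ (fuel i : Nat) (s : PySem.Set Int), i ≤ pvN a b hb → pvN a b hb - i ≤ fuel →
    (∀ x : Int, x ∈ s ↔ ∃ j < i, pvItr a b j = x) →
    findRecSeek b fuel s (pvItr a b i) = pvItr a b (pvN a b hb) := by
  intro fuel
  induction fuel with
  | zero =>
    intro i s hi hfuel _
    have : i = pvN a b hb := by omega
    subst this; rfl
  | succ fuel ih =>
    intro i s hi hfuel hs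
    rcases eq_or_lt_of_le hi with hiN | hiN
    · subst hiN
      have hcond : ¬ (pvItr a b (pvN a b hb) ≠ 0 ∧
          PySem.Set.contains s (pvItr a b (pvN a b hb)) = false) := by
        rcases pvN_spec a b hb with h0 | ⟨j, hj, hje⟩
        · exact fun h => h.1 h0
        · intro h
          have hm : pvItr a b (pvN a b hb) ∈ s := (hs _).2 ⟨j, hj, hje⟩
          have hc : PySem.Set.contains s (pvItr a b (pvN a b hb)) = true := by
            simpa [PySem.Set.contains] using hm
          rw [h.2] at hc; exact Bool.noConfusion hc
      show (if _ ≠ 0 ∧ _ = false then _ else _) = _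
      rw [if_neg hcond]
    · have hnz : pvItr a b i ≠ 0 := pvItr_ne_zero a b hb hiN
      have hnotmem : pvItr a b i ∉ s := by
        intro hmem
        obtain ⟨j, hj, hje⟩ := (hs _).1 hmem
        exact pvItr_inj a b hb hj hiN hje
      have hcont : PySem.Set.contains s (pvItr a b i) = false := by
        rw [← Bool.not_eq_true]
        intro h
        exact hnotmem ((by simp [PySem.Set.contains] : PySem.Set.contains s (pvItr a b i) = true ↔
          pvItr a b i ∈ s).1 h)
      rw [findRecSeek, if_pos ⟨hnz, hcont⟩]
      exact ih (i + 1) _ hiN (by omega) (fun x => by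
        rw [PySem.Set.mem_add]
        constructor
        · rintro (hx | hx)
          · obtain ⟨j, hj, hje⟩ := (hs _).1 hx
            exact ⟨j, by omega, hje⟩
          · exact ⟨i, by omega, hx.symm⟩
        · rintro ⟨j, hj, hje⟩
          rcases Nat.lt_or_ge j i with h | h
          · exact Or.inl ((hs _).2 ⟨j, h, hje⟩)
          · have : j = i := by omega
            subst this; exact Or.inr hje.symm)

-- B's second loop emits exactly the digits of indices k..N-1
theorem findRecEmit_spec (a b : Int) (hb : b ≠ 0) :
    ∀ (fuel k : Nat) (acc : List String), pvMu a b hb ≤ k → k < pvN a b hb →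
    pvN a b hb - k ≤ fuel →
    findRecEmit b (pvItr a b (pvN a b hb)) fuel (pvItr a b k) acc =
      acc ++ (List.range' k (pvN a b hb - k)).map (pvDig a b) := by
  intro fuel
  induction fuel with
  | zero => intro k acc _ hk hfuel; omega
  | succ fuel ih =>
    intro k acc hmuk hk hfuel
    by_cases hN : k + 1 = pvN a b hb
    · have hr' : PySem.Int.mod (pvItr a b k * 10) b = pvItr a b (pvN a b hb) := by
        rw [← hN]; rfl
      rw [findRecEmit]
      simp only [hr', if_true]
      have h1 : pvN a b hb - k = 1 := by omega
      rw [h1]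
      simp [pvDig, List.range'_succ]
    · have hlt : k + 1 < pvN a b hb := by omega
      have hr' : PySem.Int.mod (pvItr a b k * 10) b = pvItr a b (k + 1) := rfl
      have hne : pvItr a b (k + 1) ≠ pvItr a b (pvN a b hb) := by
        intro he
        have := pvMu_unique a b hb hlt he
        omega
      rw [findRecEmit]
      simp only [hr', if_neg hne]
      rw [ih (k + 1) _ (by omega) hlt (by omega)]
      have hsplit : pvN a b hb - k = (pvN a b hb - (k + 1)) + 1 := by omega
      rw [hsplit, List.range'_succ]
      simp [pvDig]

theorem pv_drop_range (m n : Nat) : (List.range n).drop m = List.range' m (n - m) := by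
  simp [List.range_eq_range', List.drop_range']

-- ===== VERDICT (by name: the statement is the Claim_ definition above) =====
theorem find_recurring_spec : Claim_equal_find_recurring := by
  intro a b _ ha
  unfold Spec_find_recurring find_recurring find_recurring_alt
  by_cases hb : b = 0
  · simp [hb]
  · rw [if_neg hb, if_neg ha, if_neg hb, if_neg ha]
    have hN := pvN_le a b hb
    have hA := findRecLoopA_spec a b hb (b.natAbs + 1) 0 (Nat.zero_le _) (by omega)
    have hB1 := findRecSeek_spec a b hb (b.natAbs + 1) 0 PySem.Set.empty (Nat.zero_le _)
      (by omega) (by intro x; simp [PySem.Set.empty])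
    simp only [pvDmap, pvRes, List.range_zero, List.map_nil, List.append_nil] at hA hB1
    have hItr0 : pvItr a b 0 = PySem.Int.mod a b := rfl
    rw [hItr0] at hA hB1
    have hA' : findRecLoopA b (b.natAbs + 1) PySem.Dict.empty
        [PySem.Int.toStr (PySem.Int.floordiv a b), "."] (PySem.Int.mod a b) =
        if pvItr a b (pvN a b hb) = 0 then "No Recurring Secuence"
        else PySem.Str.join ""
          (((List.range (pvN a b hb)).map (pvDig a b)).drop (pvMu a b hb + 2 - 2)) := hA
    show _ = (if findRecSeek b (b.natAbs + 1) PySem.Set.empty (PySem.Int.mod a b) = 0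
        then "No Recurring Secuence"
        else PySem.Str.join "" (findRecEmit b
          (findRecSeek b (b.natAbs + 1) PySem.Set.empty (PySem.Int.mod a b)) (b.natAbs + 1)
          (findRecSeek b (b.natAbs + 1) PySem.Set.empty (PySem.Int.mod a b)) []))
    rw [hB1, hA']
    by_cases h0 : pvItr a b (pvN a b hb) = 0
    · rw [if_pos h0, if_pos h0]
    · rw [if_neg h0, if_neg h0]
      have hmu_lt := pvMu_lt a b hb h0
      have hstart : pvItr a b (pvN a b hb) = pvItr a b (pvMu a b hb) := (pvMu_spec a b hb).symm
      have hE := findRecEmit_spec a b hb (b.natAbs + 1) (pvMu a b hb) [] le_rfl hmu_lt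
        (by omega)
      rw [hstart] at hE
      rw [hstart, hE]
      congr 1
      have : pvMu a b hb + 2 - 2 = pvMu a b hb := by omega
      rw [this, ← List.map_drop, pv_drop_range]
      simp
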